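-- pv_equiv track=rewrite | github.com/minwang2022/leetcode | top_questions.py | pre_word
-- ===== SOURCE A (Python) =====
-- def pre_word(a, b):
--     if len(a) + 1 != len(b):
--         return False
--     i = 0
--     j = 0
--     while i < len(a) and j < len(b):
--         if a[i] == b[j]:
--             i += 1
--         j += 1
--     if(i == len(a)):
--         return True
--     return False
-- ===== SOURCE B (Python) =====
-- def common_prefix_len(x, y):
--     n = 0
--     while n < len(x) and n < len(y) and x[n] == y[n]:
--         n += 1
--     return n
--
-- def pre_word(a, b):
--     if len(a) + 1 != len(b):
--         return False
--     p = common_prefix_len(a, b)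
--     s = common_prefix_len(a[::-1], b[::-1])
--     return p + s >= len(a)
-- ===== Notes on version B (the rewrite author's own statement) =====
-- stated objective: alternative
-- what changed: Replaces A's interleaved two-pointer subsequence scan with the common-prefix-plus-common-suffix criterion: a is b minus one char iff prefix_len(a,b) + prefix_len(reverse a, reverse b) >= len(a), using one forward and one backward scan and an arithmetic test instead of a skip-and-continue scan.
import Mathlib
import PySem

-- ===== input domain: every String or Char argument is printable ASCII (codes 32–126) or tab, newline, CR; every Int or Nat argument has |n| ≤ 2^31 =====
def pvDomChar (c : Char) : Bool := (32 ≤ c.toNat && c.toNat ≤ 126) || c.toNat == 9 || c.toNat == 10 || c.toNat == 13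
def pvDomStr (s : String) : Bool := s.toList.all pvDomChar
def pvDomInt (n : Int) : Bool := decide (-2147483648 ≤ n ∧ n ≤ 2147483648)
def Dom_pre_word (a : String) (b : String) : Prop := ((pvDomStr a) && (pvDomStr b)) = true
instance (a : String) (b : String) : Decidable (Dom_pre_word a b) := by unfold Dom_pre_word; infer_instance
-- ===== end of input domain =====

-- B replaces A's interleaved two-pointer subsequence scan by a different criterion: common-prefix length plus common-suffix length (prefix of the reverses) must cover a (alternative decomposition, same cost).


-- ===== PORT A =====
-- A's while loop: i advances only on a[i]==b[j], j always advances; returns the unmatched tail of a.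
def pvLoopA : List Char → List Char → List Char
  | x :: as, y :: bs => if x = y then pvLoopA as bs else pvLoopA (x :: as) bs
  | as, _ => as
  termination_by _ bs => bs.length

def pre_word (a : String) (b : String) : Bool :=
  if a.toList.length + 1 ≠ b.toList.length then false
  else if pvLoopA a.toList b.toList = [] then true else false

-- ===== PORT B =====
-- B's helper common_prefix_len: length of the longest common prefix of two strings
def pvPref : List Char → List Char → Nat
  | x :: as, y :: bs => if x = y then pvPref as bs + 1 else 0
  | _, _ => 0

def pre_word_alt (a : String) (b : String) : Bool :=
  if a.toList.length + 1 ≠ b.toList.length then false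
  else
    let p := pvPref a.toList b.toList
    let s := pvPref a.toList.reverse b.toList.reverse
    decide (p + s ≥ a.toList.length)

-- ===== PRECONDITION & SPEC =====
def Spec_pre_word (a : String) (b : String) (out : Bool) : Prop := out = pre_word_alt a b
instance (a : String) (b : String) (out : Bool) : Decidable (Spec_pre_word a b out) := by unfold Spec_pre_word; infer_instance

-- ===== CLAIM (what is proved, stated in full; the proofs are below) =====
def Claim_equal_pre_word : Prop := ∀ (a : String) (b : String), Dom_pre_word a b → Spec_pre_word a b (pre_word a b)

-- ===== LEMMAS AND PROOFS =====

theorem pvLoopA_cons (x y : Char) (as bs : List Char) :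
    pvLoopA (x :: as) (y :: bs) = if x = y then pvLoopA as bs else pvLoopA (x :: as) bs := by
  simp [pvLoopA]

theorem pvPref_cons (x y : Char) (as bs : List Char) :
    pvPref (x :: as) (y :: bs) = if x = y then pvPref as bs + 1 else 0 := by
  simp [pvPref]

theorem pvLoopA_length (as bs : List Char) : as.length ≤ bs.length + (pvLoopA as bs).length := by
  induction bs generalizing as with
  | nil => cases as <;> simp [pvLoopA]
  | cons y bs ih =>
    cases as with
    | nil => simp [pvLoopA]
    | cons x as =>
      by_cases h : x = y
      · rw [pvLoopA_cons, if_pos h]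
        have := ih as
        simp only [List.length_cons]
        omega
      · rw [pvLoopA_cons, if_neg h]
        have := ih (x :: as)
        simp only [List.length_cons] at this ⊢
        omega

theorem pvLoopA_eq_len (as bs : List Char) (h : bs.length = as.length) :
    (pvLoopA as bs = []) ↔ as = bs := by
  induction bs generalizing as with
  | nil =>
    cases as with
    | nil => simp [pvLoopA]
    | cons x as => simp at h
  | cons y bs ih =>
    cases as with
    | nil => simp at h
    | cons x as =>
      by_cases hxy : x = y
      · subst hxy
        rw [pvLoopA_cons, if_pos rfl]
        simp at h
        rw [ih as h]
        simp
      · rw [pvLoopA_cons, if_neg hxy]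
        constructor
        · intro he
          have := pvLoopA_length (x :: as) bs
          rw [he] at this
          simp at this h
          omega
        · intro he
          simp at he
          exact absurd he.1 hxy

theorem pvLoopA_iff (as bs : List Char) (h : bs.length = as.length + 1) :
    (pvLoopA as bs = []) ↔ (as.drop (pvPref as bs) = bs.drop (pvPref as bs + 1)) := by
  induction bs generalizing as with
  | nil => simp at h
  | cons y bs ih =>
    cases as with
    | nil =>
      simp at h
      cases bs with
      | nil => simp [pvLoopA, pvPref]
      | cons z bs => simp at h
    | cons x as =>
      by_cases hxy : x = y
      · subst hxy
        rw [pvLoopA_cons, if_pos rfl, pvPref_cons, if_pos rfl]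
        simp at h
        rw [ih as h]
        simp
      · rw [pvLoopA_cons, if_neg hxy, pvPref_cons, if_neg hxy]
        simp only [List.drop_zero, List.drop_succ_cons]
        simp at h
        exact pvLoopA_eq_len (x :: as) bs (by simp; omega)

theorem pvPref_le_left (as bs : List Char) : pvPref as bs ≤ as.length := by
  induction bs generalizing as with
  | nil => cases as <;> simp [pvPref]
  | cons y bs ih =>
    cases as with
    | nil => simp [pvPref]
    | cons x as =>
      rw [pvPref_cons]
      split_ifs
      · have := ih as; simp; omega
      · simp

theorem pvPref_take (as bs : List Char) :
    as.take (pvPref as bs) = bs.take (pvPref as bs) := by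
  induction bs generalizing as with
  | nil => cases as <;> simp [pvPref]
  | cons y bs ih =>
    cases as with
    | nil => simp [pvPref]
    | cons x as =>
      rw [pvPref_cons]
      split_ifs with h
      · subst h; simp [ih as]
      · simp

theorem pvPref_append (c u v : List Char) : c.length ≤ pvPref (c ++ u) (c ++ v) := by
  induction c with
  | nil => simp
  | cons x c ih =>
    rw [List.cons_append, List.cons_append, pvPref_cons, if_pos rfl]
    simp only [List.length_cons]
    omega

-- the bridge: A's residual-empty test equals B's prefix+suffix criterion
theorem pv_bridge (as bs : List Char) (h : bs.length = as.length + 1) :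
    (as.drop (pvPref as bs) = bs.drop (pvPref as bs + 1)) ↔
      (pvPref as bs + pvPref as.reverse bs.reverse ≥ as.length) := by
  set p := pvPref as bs with hp
  have hple : p ≤ as.length := pvPref_le_left as bs
  constructor
  · intro hd
    have ha : as.reverse = (as.drop p).reverse ++ (as.take p).reverse := by
      conv_lhs => rw [← List.take_append_drop p as]
      rw [List.reverse_append]
    have hb : bs.reverse = (bs.drop (p + 1)).reverse ++ (bs.take (p + 1)).reverse := by
      conv_lhs => rw [← List.take_append_drop (p + 1) bs]
      rw [List.reverse_append]
    have := pvPref_append ((as.drop p).reverse) ((as.take p).reverse) ((bs.take (p + 1)).reverse)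
    rw [← ha] at this
    rw [hd] at this
    rw [← hb] at this
    simp only [List.length_reverse, List.length_drop] at this
    omega
  · intro hs
    set s := pvPref as.reverse bs.reverse with hsdef
    have hsle : s ≤ as.length := by
      have := pvPref_le_left as.reverse bs.reverse
      simpa using this
    have ht := pvPref_take as.reverse bs.reverse
    rw [← hsdef] at ht
    rw [List.take_reverse, List.take_reverse] at ht
    have hdr : as.drop (as.length - s) = bs.drop (bs.length - s) := by
      have := congrArg List.reverse ht
      simpa using this
    have := congrArg (List.drop (p - (as.length - s))) hdr
    rw [List.drop_drop, List.drop_drop] at this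
    have e1 : as.length - s + (p - (as.length - s)) = p := by omega
    have e2 : bs.length - s + (p - (as.length - s)) = p + 1 := by omega
    rw [e1, e2] at this
    exact this

-- ===== VERDICT (by name: the statement is the Claim_ definition above) =====
theorem pre_word_spec : Claim_equal_pre_word := by
  intro a b _
  unfold Spec_pre_word pre_word pre_word_alt
  by_cases h : a.toList.length + 1 ≠ b.toList.length
  · rw [if_pos h, if_pos h]
  · rw [if_neg h, if_neg h]
    simp only [ne_eq, Decidable.not_not] at h
    have key := (pvLoopA_iff a.toList b.toList h.symm).trans (pv_bridge a.toList b.toList h.symm)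
    by_cases hd : pvLoopA a.toList b.toList = []
    · rw [if_pos hd]
      rw [key] at hd
      exact (decide_eq_true hd).symm
    · rw [if_neg hd]
      rw [key] at hd
      exact (decide_eq_false hd).symm
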